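-- pv_equiv track=rewrite | github.com/d-alexeev/proptech-news-monitoring | tools/pdf_extract.py | _normalize_text_limited
-- ===== SOURCE A (Python) =====
-- def _normalize_text_limited(text: str, max_chars: int) -> tuple[str, int]:
--     """Normalize text while storing at most max_chars.
--
--     Returns (stored_text, observed_normalized_chars). The observed count can
--     exceed max_chars, but the returned text never does.
--     """
--     if max_chars <= 0:
--         return "", 0
--     chars: list[str] = []
--     stored = 0
--     observed = 0
--     pending_space = False
--     for char in text:
--         if char.isspace():
--             if observed > 0:
--                 pending_space = True
--             continue
--         if pending_space:
--             observed += 1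
--             if stored < max_chars:
--                 chars.append(" ")
--                 stored += 1
--             pending_space = False
--         observed += 1
--         if stored < max_chars:
--             chars.append(char)
--             stored += 1
--     return "".join(chars), observed
-- ===== SOURCE B (Python) =====
-- def _normalize_text_limited(text: str, max_chars: int) -> tuple[str, int]:
--     """Normalize whitespace, store a capped prefix, count normalized chars."""
--     if max_chars <= 0:
--         return "", 0
--     normalized = " ".join(text.split())
--     return normalized[:max_chars], len(normalized)
-- ===== Notes on version B (the rewrite author's own statement) =====
-- stated objective: simpler
-- what changed: Replaced the streaming per-character loop with its pending-space flag, cap counter and observed counter by a tokenize-then-join decomposition: build the fully normalized string once with " ".join(text.split()) and return its slice and length.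
import Mathlib
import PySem

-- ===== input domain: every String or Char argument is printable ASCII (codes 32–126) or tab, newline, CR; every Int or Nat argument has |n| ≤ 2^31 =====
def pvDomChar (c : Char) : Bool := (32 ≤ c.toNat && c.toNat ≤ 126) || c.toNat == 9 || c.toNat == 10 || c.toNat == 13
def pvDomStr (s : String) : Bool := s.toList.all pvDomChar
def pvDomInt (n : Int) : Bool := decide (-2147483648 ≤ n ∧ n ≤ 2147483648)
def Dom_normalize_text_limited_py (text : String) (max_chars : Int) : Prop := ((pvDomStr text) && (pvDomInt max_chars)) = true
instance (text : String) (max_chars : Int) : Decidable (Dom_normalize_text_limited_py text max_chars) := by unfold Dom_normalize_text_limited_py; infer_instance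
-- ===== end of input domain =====

-- B replaces A's streaming pending-space/cap loop by "join the split words once, then slice"; objective: simpler.


-- ===== PORT A =====
-- one iteration of A's for-loop; state = (chars, stored, observed, pending_space)
def ntlStep (max_chars : Int) (st : List Char × Int × Int × Bool) (c : Char) :
    List Char × Int × Int × Bool :=
  let (chars, stored, observed, pending) := st
  if PySem.Chars.isspace c then
    (chars, stored, observed, if observed > 0 then true else pending)
  else
    let (chars, stored, observed, pending) :=
      if pending then
        ((if stored < max_chars then chars ++ [' '] else chars),
         (if stored < max_chars then stored + 1 else stored),
         observed + 1, false)
      else (chars, stored, observed, pending)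
    ((if stored < max_chars then chars ++ [c] else chars),
     (if stored < max_chars then stored + 1 else stored),
     observed + 1, pending)

def normalize_text_limited_py (text : String) (max_chars : Int) : String × Int :=
  if max_chars ≤ 0 then ("", 0)
  else
    let st := text.toList.foldl (ntlStep max_chars) ([], 0, 0, false)
    -- "".join(chars) of single-character strings is the string of that char list
    (String.ofList st.1, st.2.2.1)

-- ===== PORT B =====
def normalize_text_limited_py_alt (text : String) (max_chars : Int) : String × Int :=
  if max_chars ≤ 0 then ("", 0)
  else
    let normalized := PySem.Chars.join [' '] (PySem.Chars.split₀ text.toList)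
    (String.ofList (PySem.List.slice normalized none (some max_chars)),
     (PySem.Chars.len normalized : Int))

-- ===== PRECONDITION & SPEC =====
def Spec_normalize_text_limited_py (text : String) (max_chars : Int) (out : String × Int) : Prop := out = normalize_text_limited_py_alt text max_chars
instance (text : String) (max_chars : Int) (out : String × Int) : Decidable (Spec_normalize_text_limited_py text max_chars out) := by unfold Spec_normalize_text_limited_py; infer_instance

-- ===== CLAIM (what is proved, stated in full; the proofs are below) =====
def Claim_equal_normalize_text_limited_py : Prop := ∀ (text : String) (max_chars : Int), Dom_normalize_text_limited_py text max_chars → Spec_normalize_text_limited_py text max_chars (normalize_text_limited_py text max_chars)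

-- ===== LEMMAS AND PROOFS =====

-- the normalized text already emitted, as a function of split₀.go's accumulators
def ntlE (cur : List Char) (acc : List (List Char)) : List Char :=
  PySem.Chars.join [' '] acc.reverse ++
    (if cur = [] then [] else (if acc = [] then [] else [' ']) ++ cur.reverse)

-- A's loop state determined by the emitted normalized prefix E (and the pending flag)
def ntlSt (m : Int) (E : List Char) (p : Bool) : List Char × Int × Int × Bool :=
  (E.take m.toNat, (((E.take m.toNat).length : Int), ((E.length : Int), p)))

lemma join_snoc (sep : List Char) (l : List (List Char)) (w : List Char) :
    PySem.Chars.join sep (l ++ [w]) =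
      PySem.Chars.join sep l ++ (if l = [] then [] else sep) ++ w := by
  induction l with
  | nil => simp [pysem]
  | cons x t ih =>
    cases t with
    | nil => simp [pysem, PySem.Chars.join_cons_cons]
    | cons y t' =>
      rw [show (x :: y :: t') ++ [w] = x :: ((y :: t') ++ [w]) from rfl,
          show (y :: t') ++ [w] = y :: (t' ++ [w]) from rfl,
          PySem.Chars.join_cons_cons,
          show y :: (t' ++ [w]) = (y :: t') ++ [w] from rfl, ih,
          PySem.Chars.join_cons_cons]
      simp

lemma join_ne_nil (l : List (List Char)) (hw : ∀ w ∈ l, w ≠ []) (hl : l ≠ []) :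
    PySem.Chars.join [' '] l ≠ [] := by
  cases l with
  | nil => exact absurd rfl hl
  | cons w t =>
    cases t with
    | nil => simpa [pysem] using hw w (by simp)
    | cons y t' =>
      rw [PySem.Chars.join_cons_cons]
      have : w ≠ [] := hw w (by simp)
      simp [this]

lemma ntlE_nil_iff (cur : List Char) (acc : List (List Char)) (hw : ∀ w ∈ acc, w ≠ []) :
    ntlE cur acc = [] ↔ (cur = [] ∧ acc = []) := by
  unfold ntlE
  rcases eq_or_ne cur [] with hc | hc
  · rcases eq_or_ne acc [] with ha | ha
    · simp [hc, ha, pysem]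
    · have : PySem.Chars.join [' '] acc.reverse ≠ [] := by
        apply join_ne_nil
        · intro w hwmem; exact hw w (by simpa using hwmem)
        · simpa using ha
      simp [hc, ha, this]
  · have hcr : cur.reverse ≠ [] := by simpa using hc
    simp [hc, hcr]

lemma ntlStep_space (m : Int) (E : List Char) (p : Bool) (c : Char)
    (hc : PySem.Chars.isspace c = true) :
    ntlStep m (ntlSt m E p) c = ntlSt m E (if (0:Int) < (E.length : Int) then true else p) := by
  simp [ntlStep, ntlSt, hc]

lemma take_snoc (E : List Char) (x : Char) (k : Nat) :
    (E ++ [x]).take k = if E.length < k then E.take k ++ [x] else E.take k := by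
  rw [List.take_append]
  split_ifs with h
  · have h1 : (1:Nat) ≤ k - E.length := by omega
    rw [List.take_of_length_le (l := [x]) (by simpa using h1), List.take_of_length_le (l := E) (le_of_lt h)]
  · have h0 : k - E.length = 0 := by omega
    simp [h0]

lemma ntlStep_nonspace_np (m : Int) (hm : 0 < m) (E : List Char) (c : Char)
    (hc : PySem.Chars.isspace c = false) :
    ntlStep m (ntlSt m E false) c = ntlSt m (E ++ [c]) false := by
  have hk : (m.toNat : Int) = m := Int.toNat_of_nonneg hm.le
  have hlen : (E.take m.toNat).length = min m.toNat E.length := by simp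
  simp only [ntlStep, ntlSt, hc, Bool.false_eq_true, if_false]
  rw [take_snoc]
  by_cases h : E.length < m.toNat
  · have hcond : ((E.take m.toNat).length : Int) < m := by
      rw [hlen, ← hk]; exact_mod_cast by omega
    simp [h, hlen]
    omega
  · have hcond : ¬ ((E.take m.toNat).length : Int) < m := by
      rw [hlen, ← hk]; push_cast; omega
    simp [h, hlen]
    omega

lemma ntlStep_nonspace_p (m : Int) (hm : 0 < m) (E : List Char) (c : Char)
    (hc : PySem.Chars.isspace c = false) :
    ntlStep m (ntlSt m E true) c = ntlSt m (E ++ [' ', c]) false := by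
  simp only [ntlStep, ntlSt, hc, Bool.false_eq_true, if_false, if_true]
  refine Prod.ext ?_ (Prod.ext ?_ (Prod.ext ?_ rfl))
  · rw [show E ++ [' ', c] = (E ++ [' ']) ++ [c] from by simp,
        take_snoc (E ++ [' ']) c, take_snoc E ' ']
    simp only [List.length_append, List.length_take, List.length_cons, List.length_nil]
    split_ifs <;>
      first
        | rfl
        | (exfalso; simp only [List.length_take, List.length_append] at *; push_cast at *; omega)
  · rw [show E ++ [' ', c] = (E ++ [' ']) ++ [c] from by simp,
        take_snoc (E ++ [' ']) c, take_snoc E ' ']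
    split_ifs <;>
      (simp only [List.length_take, List.length_append, List.length_cons, List.length_nil] at * <;>
       push_cast at * <;> omega)
  · simp only [List.length_append, List.length_cons, List.length_nil]
    push_cast
    ring

lemma ntlE_nil_acc (acc : List (List Char)) : ntlE [] acc = PySem.Chars.join [' '] acc.reverse := by
  simp [ntlE]

lemma ntlE_close_word (cur : List Char) (acc : List (List Char)) (hc : cur ≠ []) :
    PySem.Chars.join [' '] ((cur.reverse :: acc).reverse) = ntlE cur acc := by
  rw [List.reverse_cons, join_snoc]
  unfold ntlE
  rcases eq_or_ne acc [] with ha | ha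
  · simp [ha, hc, pysem]
  · have : acc.reverse ≠ [] := by simpa using ha
    simp [ha, hc, this]

lemma ntlE_push_char (cur : List Char) (acc : List (List Char)) (c : Char) :
    ntlE (c :: cur) acc =
      ntlE cur acc ++ (if cur = [] ∧ acc ≠ [] then [' ', c] else [c]) := by
  unfold ntlE
  rcases eq_or_ne cur [] with hc | hc
  · rcases eq_or_ne acc [] with ha | ha
    · simp [hc, ha]
    · simp [hc, ha]
  · have : (c :: cur) ≠ [] := by simp
    simp [hc, this, List.append_assoc]

lemma ntl_loop (m : Int) (hm : 0 < m) :
    ∀ (cs cur : List Char) (acc : List (List Char)), (∀ w ∈ acc, w ≠ []) →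
    ∃ p, List.foldl (ntlStep m) (ntlSt m (ntlE cur acc) (decide (cur = [] ∧ acc ≠ []))) cs
         = ntlSt m (PySem.Chars.join [' '] (PySem.Chars.split₀.go cs cur acc)) p := by
  intro cs
  induction cs with
  | nil =>
    intro cur acc hw
    refine ⟨decide (cur = [] ∧ acc ≠ []), ?_⟩
    rcases eq_or_ne cur [] with hc | hc
    · simp [PySem.Chars.split₀.go, hc, ntlE_nil_acc]
    · have : cur.isEmpty = false := by simpa [List.isEmpty_iff] using hc
      simp only [PySem.Chars.split₀.go, this, Bool.false_eq_true, if_false, List.foldl_nil]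
      rw [ntlE_close_word cur acc hc]
  | cons c rest ih =>
    intro cur acc hw
    rw [List.foldl_cons]
    cases hsp : PySem.Chars.isspace c with
    | true =>
      rw [ntlStep_space m _ _ c hsp]
      rcases eq_or_ne cur [] with hc | hc
      · subst hc
        have hgo : PySem.Chars.split₀.go (c :: rest) [] acc = PySem.Chars.split₀.go rest [] acc := by
          simp [PySem.Chars.split₀.go, hsp]
        rw [hgo]
        rcases eq_or_ne acc [] with ha | ha
        · subst ha
          have hEnil : ntlE ([]:List Char) [] = [] := by simp [ntlE, pysem]
          rw [show (if (0:Int) < ((ntlE ([]:List Char) []).length : Int) then true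
                else decide (([]:List Char) = [] ∧ ([]:List (List Char)) ≠ [])) = decide (([]:List Char) = [] ∧ ([]:List (List Char)) ≠ []) from by
            simp [hEnil]]
          exact ih [] [] hw
        · have hne : ntlE ([]:List Char) acc ≠ [] := fun h => ha ((ntlE_nil_iff _ _ hw).mp h).2
          have hpos : (0:Int) < ((ntlE ([]:List Char) acc).length : Int) := by
            exact_mod_cast List.length_pos_iff.mpr hne
          rw [if_pos hpos, show (true : Bool) = decide (([]:List Char) = [] ∧ acc ≠ []) from by simp [ha]]
          exact ih [] acc hw
      · have hcur : cur.isEmpty = false := by simpa [List.isEmpty_iff] using hc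
        have hgo : PySem.Chars.split₀.go (c :: rest) cur acc
            = PySem.Chars.split₀.go rest [] (cur.reverse :: acc) := by
          simp [PySem.Chars.split₀.go, hsp, hcur]
        rw [hgo]
        have hne : ntlE cur acc ≠ [] := fun h => hc ((ntlE_nil_iff _ _ hw).mp h).1
        have hpos : (0:Int) < ((ntlE cur acc).length : Int) := by
          exact_mod_cast List.length_pos_iff.mpr hne
        have hE : ntlE cur acc = ntlE [] (cur.reverse :: acc) := by
          rw [ntlE_nil_acc, ntlE_close_word cur acc hc]
        rw [if_pos hpos, hE,
            show (true : Bool) = decide (([]:List Char) = [] ∧ (cur.reverse :: acc) ≠ []) from by simp]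
        exact ih [] (cur.reverse :: acc) (by
          intro w hwmem
          rcases List.mem_cons.mp hwmem with h | h
          · subst h; simpa using hc
          · exact hw w h)
    | false =>
      have hgo : PySem.Chars.split₀.go (c :: rest) cur acc
          = PySem.Chars.split₀.go rest (c :: cur) acc := by
        simp [PySem.Chars.split₀.go, hsp]
      rw [hgo]
      by_cases hpd : cur = [] ∧ acc ≠ []
      · rw [show decide (cur = [] ∧ acc ≠ []) = true from decide_eq_true hpd]
        rw [ntlStep_nonspace_p m hm _ c hsp]
        have hE : ntlE cur acc ++ [' ', c] = ntlE (c :: cur) acc := by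
          rw [ntlE_push_char]; simp [hpd]
        rw [hE, show (false : Bool) = decide ((c :: cur) = [] ∧ acc ≠ []) from by simp]
        exact ih (c :: cur) acc hw
      · rw [show decide (cur = [] ∧ acc ≠ []) = false from decide_eq_false hpd]
        rw [ntlStep_nonspace_np m hm _ c hsp]
        have hE : ntlE cur acc ++ [c] = ntlE (c :: cur) acc := by
          rw [ntlE_push_char]; simp [hpd]
        rw [hE, show (false : Bool) = decide ((c :: cur) = [] ∧ acc ≠ []) from by simp]
        exact ih (c :: cur) acc hw

-- ===== VERDICT (by name: the statement is the Claim_ definition above) =====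
theorem normalize_text_limited_py_spec : Claim_equal_normalize_text_limited_py := by
  intro text m _
  unfold Spec_normalize_text_limited_py normalize_text_limited_py normalize_text_limited_py_alt
  by_cases hm : m ≤ 0
  · simp [hm]
  · have hm' : 0 < m := lt_of_not_ge hm
    simp only [hm, if_false]
    obtain ⟨p, hp⟩ := ntl_loop m hm' text.toList [] [] (by simp)
    have h0 : ntlSt m (ntlE [] []) (decide (([]:List Char) = [] ∧ ([]:List (List Char)) ≠ []))
        = (([]:List Char), (0:Int), (0:Int), false) := by
      simp [ntlSt, ntlE, pysem]
    rw [h0] at hp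
    have hsplit : PySem.Chars.split₀ text.toList = PySem.Chars.split₀.go text.toList [] [] := rfl
    rw [hp, ← hsplit]
    have hslice : PySem.List.slice (PySem.Chars.join [' '] (PySem.Chars.split₀ text.toList)) none (some m)
        = (PySem.Chars.join [' '] (PySem.Chars.split₀ text.toList)).take m.toNat :=
      PySem.List.slice_to _ hm'.le
    simp [ntlSt, hslice, PySem.Chars.len_eq]
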